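-- pv_equiv track=rewrite | github.com/CraftNobody0505/PythonCodingChallenges | PythonCodingChallenges.py | sum15
-- ===== SOURCE A (Python) =====
-- def sum15(numbers):
--     """
--     计算列表的和，但如果列表中存在15，则15和15之后的一个数字均不进行求和。
--     """
--     total_sum = 0
--     i = 0
--     n = len(numbers)
--
--     while i < n:
--         if numbers[i] == 15:
--             i += 2  # 跳过15和它后面的一个数字 (索引增加2)
--         else:
--             total_sum += numbers[i]
--             i += 1  # 索引增加1
--
--     return total_sum
-- ===== SOURCE B (Python) =====
-- def sum15(numbers):
--     # Right-to-left dynamic programming: f1 = answer for the suffix starting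
--     # at the current element's position + 1, f2 = answer for position + 2.
--     # A suffix beginning with 15 is worth f2 (drop 15 and its follower),
--     # otherwise its head plus f1.
--     f1 = 0
--     f2 = 0
--     for x in reversed(numbers):
--         f1, f2 = (f2 if x == 15 else x + f1), f1
--     return f1
-- ===== Notes on version B (the rewrite author's own statement) =====
-- stated objective: alternative
-- what changed: Replaces A's left-to-right while loop with manual index jumps by a right-to-left dynamic-programming pass that carries the answers for the next two suffixes (f1, f2) and combines them per element, with no skipping state or index arithmetic.
import Mathlib
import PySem

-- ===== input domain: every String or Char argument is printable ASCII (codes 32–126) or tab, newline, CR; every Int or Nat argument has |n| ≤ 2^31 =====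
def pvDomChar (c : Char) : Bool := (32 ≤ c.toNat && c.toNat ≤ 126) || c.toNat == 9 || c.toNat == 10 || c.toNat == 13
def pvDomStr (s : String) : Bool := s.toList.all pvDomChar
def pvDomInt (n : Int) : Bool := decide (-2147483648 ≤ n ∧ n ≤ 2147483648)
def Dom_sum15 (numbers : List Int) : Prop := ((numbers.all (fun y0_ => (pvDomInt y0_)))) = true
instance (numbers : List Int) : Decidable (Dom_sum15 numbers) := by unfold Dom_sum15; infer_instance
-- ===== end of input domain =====

-- B replaces A's index-jumping while loop by a right-to-left DP pass carrying the answers for the next two suffixes (alternative decomposition).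

-- ===== PORT A =====
-- A's while loop over index i with state (total_sum, i); i += 2 skips 15 and its follower.
def sum15Loop (numbers : List Int) (total : Int) (i : Nat) : Int :=
  if i < numbers.length then
    if numbers.getD i 0 == 15 then
      sum15Loop numbers total (i + 2)
    else
      sum15Loop numbers (total + numbers.getD i 0) (i + 1)
  else total
termination_by numbers.length - i
decreasing_by all_goals omega

def sum15 (numbers : List Int) : Int := sum15Loop numbers 0 0

-- ===== PORT B =====
-- B's loop body: state (f1, f2) = answers for the next two suffixes; iterated over reversed(numbers).
def sum15Step (acc : Int × Int) (x : Int) : Int × Int :=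
  ((if x == 15 then acc.2 else x + acc.1), acc.1)

def sum15_alt (numbers : List Int) : Int :=
  (numbers.reverse.foldl sum15Step (0, 0)).1

-- ===== PRECONDITION & SPEC =====
def Spec_sum15 (numbers : List Int) (out : Int) : Prop := out = sum15_alt numbers
instance (numbers : List Int) (out : Int) : Decidable (Spec_sum15 numbers out) := by unfold Spec_sum15; infer_instance

-- ===== CLAIM (what is proved, stated in full; the proofs are below) =====
def Claim_equal_sum15 : Prop := ∀ (numbers : List Int), Dom_sum15 numbers → Spec_sum15 numbers (sum15 numbers)

-- ===== LEMMAS AND PROOFS =====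

-- proof-side characterisation: the intended value of the suffix, by structural recursion
def sumRec (numbers : List Int) : Int :=
  match numbers with
  | [] => 0
  | x :: rest => if x == 15 then sumRec (rest.drop 1) else x + sumRec rest
termination_by numbers.length
decreasing_by all_goals (simp only [List.length_drop, List.length_cons]; omega)

theorem sum15_loop_eq_rec (numbers : List Int) (total : Int) (i : Nat) :
    sum15Loop numbers total i = total + sumRec (numbers.drop i) := by
  fun_induction sum15Loop numbers total i with
  | case1 total i hlt heq ih =>
      have hx : numbers.getD i 0 = numbers[i] := List.getD_eq_getElem numbers 0 hlt
      have h15 : numbers[i] = (15 : Int) := by rw [← hx]; exact eq_of_beq heq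
      rw [ih, List.drop_eq_getElem_cons hlt, h15]
      have hdd : (numbers.drop (i + 1)).drop 1 = numbers.drop (i + 2) := by
        rw [List.drop_drop]
      have : sumRec ((15 : Int) :: numbers.drop (i + 1)) = sumRec (numbers.drop (i + 2)) := by
        rw [sumRec]; simp [hdd]
      rw [this]
  | case2 total i hlt hne ih =>
      have hx : numbers.getD i 0 = numbers[i] := List.getD_eq_getElem numbers 0 hlt
      have h15 : ¬ (numbers[i] = (15 : Int)) := by rw [← hx]; simpa using hne
      rw [ih, List.drop_eq_getElem_cons hlt, hx]
      have : sumRec (numbers[i] :: numbers.drop (i + 1)) = numbers[i] + sumRec (numbers.drop (i + 1)) := by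
        rw [sumRec]; simp [h15]
      rw [this]; ring
  | case3 total i hge =>
      have : numbers.drop i = [] := List.drop_eq_nil_of_le (by omega)
      simp [this, sumRec]

theorem sum15_fold_eq_rec (l : List Int) :
    l.foldr (fun x acc => sum15Step acc x) (0, 0) = (sumRec l, sumRec (l.drop 1)) := by
  induction l with
  | nil => simp [sumRec]
  | cons x t ih =>
      rw [List.foldr_cons, ih]
      by_cases h : x = (15 : Int)
      · subst h
        simp only [sum15Step]
        rw [sumRec]
        simp
      · simp only [sum15Step]
        rw [sumRec]
        simp [h]

-- ===== VERDICT (by name: the statement is the Claim_ definition above) =====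
theorem sum15_spec : Claim_equal_sum15 := by
  intro numbers _
  unfold Spec_sum15 sum15 sum15_alt
  rw [List.foldl_reverse, sum15_fold_eq_rec]
  simpa using sum15_loop_eq_rec numbers 0 0
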